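-- pv_equiv track=rewrite | github.com/changchun-zhou/Sagitta_test | Whole_test/output/test_data_set/1249_74x72/ROM_data/Gen_coe_1bitx2.py | filter_8bit_1bitx2
-- ===== SOURCE A (Python) =====
-- def filter_8bit_1bitx2 ( hex_in ):
--     bin_in = bin( int(hex_in, 16) ).lstrip('0b').zfill(128)
--     bin_out = ''
--     for i in range(128):
--         if i % 8 == 0:
--             cnt_byte_1 = 0
--
--         if bin_in[i] == "1" and cnt_byte_1 < 2 :
--             bin_out += "1"
--             cnt_byte_1 += 1
--         else:
--             bin_out += "0"
--     hex_out = hex( int(bin_out, 2) ).lstrip('0x').rstrip("L").zfill(32)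
--
--     return hex_out
-- ===== SOURCE B (Python) =====
-- def filter_8bit_1bitx2(hex_in):
--     bin_in = bin(int(hex_in, 16)).lstrip('0b').zfill(128)
--     out = 0
--     for k in range(16):
--         b = int(bin_in[8 * k : 8 * k + 8], 2)
--         keep = 0
--         for _ in range(2):
--             if b > 0:
--                 t = 1 << (b.bit_length() - 1)
--                 keep += t
--                 b -= t
--         out = (out << 8) + keep
--     return '%032x' % out
-- ===== Notes on version B (the rewrite author's own statement) =====
-- stated objective: alternative
-- what changed: Replaces the 128-iteration per-bit scan that builds the output as a character string with a counter by a 16-iteration per-byte loop: each byte's 8-bit slice is converted to an integer once and its two highest set bits are kept arithmetically via bit_length, accumulating the result as a number.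
-- outside the precondition, e.g. on filter_8bit_1bitx2('-1'): A returns '00000000000000000000000000000001', B raises ValueError
import Mathlib
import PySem

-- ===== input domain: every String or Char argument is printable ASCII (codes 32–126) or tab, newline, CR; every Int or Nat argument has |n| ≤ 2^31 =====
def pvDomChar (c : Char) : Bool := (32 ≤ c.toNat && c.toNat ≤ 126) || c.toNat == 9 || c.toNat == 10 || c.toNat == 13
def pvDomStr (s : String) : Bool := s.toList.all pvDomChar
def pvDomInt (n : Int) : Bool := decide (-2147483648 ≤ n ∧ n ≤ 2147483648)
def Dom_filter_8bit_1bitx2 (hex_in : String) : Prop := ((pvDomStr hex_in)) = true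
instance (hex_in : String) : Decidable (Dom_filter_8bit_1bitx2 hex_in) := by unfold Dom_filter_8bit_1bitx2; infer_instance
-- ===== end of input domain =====

-- B keeps only the two highest set bits of each byte by integer bit arithmetic (16 byte steps)
-- instead of A's 128 per-character scan with a counter and string concatenation; return value only.

-- Shared helpers (both Pythons execute the identical first line, and PySem has no hex()/'%x'):
-- bin(int(hex_in, 16)).lstrip('0b').zfill(128) — exact: lstrip('0b') drops leading chars in {'0','b'}
def pvBinIn (n : Int) : List Char :=
  PySem.Chars.zfill ((PySem.Int.toBinChars0b n).dropWhile (fun c => c == '0' || c == 'b')) 128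

-- hex digits of a Nat, most significant first — hand port of the digit part of Python's hex()/'%x'
def pvHexDigitChar (d : Nat) : Char :=
  (['0','1','2','3','4','5','6','7','8','9','a','b','c','d','e','f'].getD d '0')
def pvHexChars (m : Nat) : List Char :=
  if m = 0 then ['0'] else ((Nat.digits 16 m).map pvHexDigitChar).reverse

-- hand port of int(s, 2): exact for the nonempty strings of '0'/'1' digits that are the only
-- strings either Python ever passes to it under Pre_ (bin_out resp. an 8-char slice of bin_in)
def pvBinVal (cs : List Char) : Int :=
  cs.foldl (fun a c => 2 * a + (if c = '1' then 1 else 0)) 0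

-- ===== PORT A =====
-- hex(r) as characters — exact hand port (PySem has no hex())
def pvPyHexChars (r : Int) : List Char :=
  if r < 0 then '-' :: '0' :: 'x' :: pvHexChars r.natAbs else '0' :: 'x' :: pvHexChars r.toNat
-- .lstrip('0x') and .rstrip('L') — exact hand ports
def pvLstrip0x (cs : List Char) : List Char := cs.dropWhile (fun c => c == '0' || c == 'x')
def pvRstripL (cs : List Char) : List Char := (cs.reverse.dropWhile (fun c => c == 'L')).reverse

-- one iteration of A's `for i in range(128)` body (cnt_byte_1 is reset when i % 8 == 0)
def pvAStep (bin_in : List Char) (st : List Char × Int) (i : Int) : List Char × Int :=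
  let cnt := if PySem.Int.mod i 8 = 0 then (0 : Int) else st.2
  if PySem.List.pyGetD bin_in i ' ' = '1' ∧ cnt < 2 then (st.1 ++ ['1'], cnt + 1)
  else (st.1 ++ ['0'], cnt)

def filter_8bit_1bitx2 (hex_in : String) : String :=
  match PySem.Int.ofStrBase? hex_in 16 with
  | none => ""          -- int(hex_in, 16) raises ValueError: outside Pre_
  | some n =>
    let bin_in := pvBinIn n
    let res := (PySem.List.pyRange 0 128 1).foldl (pvAStep bin_in) ([], 0)
    String.ofList (PySem.Chars.zfill (pvRstripL (pvLstrip0x (pvPyHexChars (pvBinVal res.1)))) 32)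

-- ===== PORT B =====
-- one iteration of B's `for k in range(16)` body: slice out byte k, keep its two highest set bits
def pvBStep (bin_in : List Char) (out : Int) (k : Int) : Int :=
  let b := pvBinVal (PySem.List.slice bin_in (some (8 * k)) (some (8 * k + 8)))
  let p := (PySem.List.pyRange 0 2 1).foldl
    (fun (p : Int × Int) _ =>
      if 0 < p.1 then
        let t := (1 : Int) <<< (PySem.Int.bitLength p.1 - 1)
        (p.1 - t, p.2 + t)
      else p) (b, 0)
  (out <<< (8 : Nat)) + p.2

def filter_8bit_1bitx2_alt (hex_in : String) : String :=
  match PySem.Int.ofStrBase? hex_in 16 with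
  | none => ""          -- int(hex_in, 16) raises ValueError: outside Pre_
  | some n =>
    let bin_in := pvBinIn n
    let out := (PySem.List.pyRange 0 16 1).foldl (pvBStep bin_in) 0
    -- '%032x' % out — exact hand port for 0 ≤ out (out is a sum of shifted byte values here)
    String.ofList (PySem.Chars.zfill (pvHexChars out.toNat) 32)

-- ===== PRECONDITION & SPEC =====
-- Pre_ excludes strings int(hex_in, 16) rejects (both programs raise ValueError there) and the
-- strings parsing to a NEGATIVE value: there B's int() on an 8-character slice naturally raises
-- ValueError on the sign and prefix characters that A's lstrip leaves inside the scanned bit string.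
def Pre_filter_8bit_1bitx2 (hex_in : String) : Prop :=
  0 ≤ (PySem.Int.ofStrBase? hex_in 16).getD (-1)
instance (hex_in : String) : Decidable (Pre_filter_8bit_1bitx2 hex_in) := by
  unfold Pre_filter_8bit_1bitx2; infer_instance

def pvWitness_filter_8bit_1bitx2 : String := "3fa9"

def Spec_filter_8bit_1bitx2 (hex_in : String) (out : String) : Prop := out = filter_8bit_1bitx2_alt hex_in
instance (hex_in : String) (out : String) : Decidable (Spec_filter_8bit_1bitx2 hex_in out) := by unfold Spec_filter_8bit_1bitx2; infer_instance

-- ===== CLAIM (what is proved, stated in full; the proofs are below) =====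
def Claim_equal_filter_8bit_1bitx2 : Prop := ∀ (hex_in : String), Dom_filter_8bit_1bitx2 hex_in → Pre_filter_8bit_1bitx2 hex_in → Spec_filter_8bit_1bitx2 hex_in (filter_8bit_1bitx2 hex_in)

-- ===== LEMMAS AND PROOFS =====

-- the per-byte character filter A implements inside each 8-char block (counter starts at 0)
def kcStep (st : List Char × Int) (c : Char) : List Char × Int :=
  if c = '1' ∧ st.2 < 2 then (st.1 ++ ['1'], st.2 + 1) else (st.1 ++ ['0'], st.2)
def kc (cs : List Char) : List Char × Int := cs.foldl kcStep ([], 0)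

-- B's inner two-pass "keep the top set bit" loop, as a function of the byte value
def pvTop2 (b : Int) : Int :=
  ((PySem.List.pyRange 0 2 1).foldl
    (fun (p : Int × Int) _ =>
      if 0 < p.1 then
        let t := (1 : Int) <<< (PySem.Int.bitLength p.1 - 1)
        (p.1 - t, p.2 + t)
      else p) (b, 0)).2

def pvChunk (w : List Char) (s : Nat) : List Char := (w.drop (8 * s)).take 8

lemma kc_acc (cs : List Char) : ∀ (acc : List Char) (cnt : Int),
    cs.foldl kcStep (acc, cnt) = (acc ++ (cs.foldl kcStep ([], cnt)).1, (cs.foldl kcStep ([], cnt)).2) := by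
  induction cs with
  | nil => intro acc cnt; simp
  | cons c cs ih =>
    intro acc cnt
    simp only [List.foldl_cons, kcStep]
    by_cases h : c = '1' ∧ cnt < 2
    · simp only [if_pos h]
      rw [ih (acc ++ ['1']) (cnt + 1), ih (([] : List Char) ++ ['1']) (cnt + 1)]
      simp
    · simp only [if_neg h]
      rw [ih (acc ++ ['0']) cnt, ih (([] : List Char) ++ ['0']) cnt]
      simp

lemma kc_shift (cs : List Char) (acc a : List Char) (cnt : Int) :
    cs.foldl kcStep (acc ++ a, cnt) = (acc ++ (cs.foldl kcStep (a, cnt)).1, (cs.foldl kcStep (a, cnt)).2) := by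
  rw [kc_acc cs (acc ++ a) cnt, kc_acc cs a cnt]; simp

lemma kc_len (cs : List Char) : (kc cs).1.length = cs.length := by
  have key : ∀ (acc : List Char) (cnt : Int), (cs.foldl kcStep (acc, cnt)).1.length = acc.length + cs.length := by
    induction cs with
    | nil => intro acc cnt; simp
    | cons c cs ih =>
      intro acc cnt
      simp only [List.foldl_cons, kcStep]
      by_cases h : c = '1' ∧ cnt < 2
      · simp only [if_pos h]; rw [ih]; simp; omega
      · simp only [if_neg h]; rw [ih]; simp; omega
  simpa [kc] using key [] 0

lemma binval_from (cs : List Char) : ∀ (a : Int),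
    cs.foldl (fun a c => 2 * a + (if c = '1' then 1 else 0)) a = a * 2 ^ cs.length + pvBinVal cs := by
  induction cs with
  | nil => intro a; simp [pvBinVal]
  | cons c cs ih =>
    intro a
    simp only [List.foldl_cons, pvBinVal]
    rw [ih, ih (2 * 0 + _)]
    simp only [List.length_cons, pow_succ]
    split_ifs <;> ring

lemma binval_append (xs ys : List Char) :
    pvBinVal (xs ++ ys) = pvBinVal xs * 2 ^ ys.length + pvBinVal ys := by
  simp only [pvBinVal, List.foldl_append]
  rw [binval_from]; rfl

lemma binval_nonneg (cs : List Char) : 0 ≤ pvBinVal cs := by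
  have key : ∀ a : Int, 0 ≤ a → 0 ≤ cs.foldl (fun a c => 2 * a + (if c = '1' then 1 else 0)) a := by
    induction cs with
    | nil => intro a ha; simpa
    | cons c cs ih => intro a ha; simp only [List.foldl_cons]; apply ih; split_ifs <;> omega
  exact key 0 le_rfl

lemma map_getD_range' (w : List Char) (a k : Nat) (h : a + k ≤ w.length) :
    (List.range' a k).map (fun j => w.getD j ' ') = (w.drop a).take k := by
  apply List.ext_getElem
  · simp; omega
  · intro i h1 h2
    simp only [List.getElem_map, List.getElem_range', List.getElem_take, List.getElem_drop]
    rw [List.getD_eq_getElem]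
    · congr 1; omega
    · simp at h1 ⊢; omega

lemma A_noreset (w : List Char) : ∀ (js : List Nat), (∀ j ∈ js, j % 8 ≠ 0) →
    ∀ (st : List Char × Int),
    (js.map (Nat.cast : Nat → Int)).foldl (pvAStep w) st
      = (js.map (fun j => w.getD j ' ')).foldl kcStep st := by
  intro js
  induction js with
  | nil => intro _ st; simp
  | cons j js ih =>
    intro hj st
    simp only [List.map_cons, List.foldl_cons]
    rw [ih (fun x hx => hj x (by simp [hx]))]
    congr 1
    have hm : PySem.Int.mod (j : Int) 8 ≠ 0 := by
      rw [show ((8:Int)) = ((8:Nat):Int) by norm_num, PySem.Int.mod_natCast]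
      have := hj j (by simp)
      exact_mod_cast this
    simp only [pvAStep, kcStep, if_neg hm, PySem.List.pyGetD_natCast]

lemma A_block (w : List Char) (s : Nat) (h : 8 * s + 8 ≤ w.length) (acc : List Char) (cnt : Int) :
    ((List.range' (8 * s) 8).map (Nat.cast : Nat → Int)).foldl (pvAStep w) (acc, cnt)
      = (acc ++ (kc (pvChunk w s)).1, (kc (pvChunk w s)).2) := by
  have hrange : List.range' (8 * s) 8 = (8 * s) :: List.range' (8 * s + 1) 7 := by
    simp [List.range'_succ]
  have hchunk : pvChunk w s = w.getD (8 * s) ' ' :: (List.range' (8 * s + 1) 7).map (fun j => w.getD j ' ') := by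
    have h2 : pvChunk w s = (List.range' (8 * s) 8).map (fun j => w.getD j ' ') := by
      rw [map_getD_range' w _ 8 (by omega)]; rfl
    rw [h2, hrange]; simp
  have hm0 : PySem.Int.mod ((8 * s : Nat) : Int) 8 = 0 := by
    rw [show ((8:Int)) = ((8:Nat):Int) by norm_num, PySem.Int.mod_natCast]
    simp [Nat.mul_mod_right]
  rw [hrange]
  simp only [List.map_cons, List.foldl_cons]
  rw [A_noreset w (List.range' (8 * s + 1) 7)
      (by intro j hj; simp [List.mem_range'_1] at hj; omega)]
  rw [hchunk]
  simp only [kc, List.foldl_cons]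
  have hstep : pvAStep w (acc, cnt) ((8 * s : Nat) : Int) = kcStep (acc, 0) (w.getD (8 * s) ' ') := by
    simp only [pvAStep, kcStep, hm0, if_true, PySem.List.pyGetD_natCast]
  rw [hstep]
  by_cases hc : w.getD (8 * s) ' ' = '1' ∧ (0 : Int) < 2
  · simp only [kcStep, if_pos hc]
    simpa using kc_shift ((List.range' (8 * s + 1) 7).map (fun j => w.getD j ' ')) acc ['1'] 1
  · simp only [kcStep, if_neg hc]
    simpa using kc_shift ((List.range' (8 * s + 1) 7).map (fun j => w.getD j ' ')) acc ['0'] 0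

lemma A_fold (w : List Char) : ∀ (m s : Nat), 8 * (s + m) ≤ w.length →
    ∀ (acc : List Char) (cnt : Int),
    (((List.range' (8 * s) (8 * m)).map (Nat.cast : Nat → Int)).foldl (pvAStep w) (acc, cnt)).1
      = acc ++ ((List.range' s m).map (fun k => (kc (pvChunk w k)).1)).flatten := by
  intro m
  induction m with
  | zero => intro s _ acc cnt; simp
  | succ m ih =>
    intro s hs acc cnt
    have hsplit : List.range' (8 * s) (8 * (m + 1)) = List.range' (8 * s) 8 ++ List.range' (8 * s + 8) (8 * m) := by
      rw [List.range'_append]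
      congr 1; omega
    rw [hsplit, List.map_append, List.foldl_append, A_block w s (by omega)]
    have h8 : 8 * s + 8 = 8 * (s + 1) := by omega
    rw [h8, ih (s + 1) (by omega)]
    have hr : List.range' s (m + 1) = s :: List.range' (s + 1) m := by
      rw [List.range'_succ]
    rw [hr]
    simp [List.append_assoc]

lemma hexchar_ne_0x (d : Nat) (h : d < 16) (h0 : d ≠ 0) :
    (pvHexDigitChar d == '0' || pvHexDigitChar d == 'x') = false := by
  interval_cases d <;> simp_all <;> decide

lemma pvHexChars_mem (m : Nat) : ∀ c ∈ pvHexChars m, c ∈ (['0','1','2','3','4','5','6','7','8','9','a','b','c','d','e','f'] : List Char) := by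
  intro c hc
  by_cases hm : m = 0
  · simp [pvHexChars, hm] at hc; simp [hc]
  · simp only [pvHexChars, if_neg hm, List.mem_reverse, List.mem_map] at hc
    obtain ⟨d, hd, rfl⟩ := hc
    have : d < 16 := Nat.digits_lt_base (by norm_num) hd
    interval_cases d <;> simp [pvHexDigitChar]

lemma pvHexChars_head (m : Nat) (hm : m ≠ 0) :
    ∃ c rest, pvHexChars m = c :: rest ∧ (c == '0' || c == 'x') = false := by
  have hne : Nat.digits 16 m ≠ [] := Nat.digits_ne_nil_iff_ne_zero.mpr hm
  have hlast := Nat.getLast_digit_ne_zero 16 hm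
  have hlt : (Nat.digits 16 m).getLast hne < 16 :=
    Nat.digits_lt_base (by norm_num) (List.getLast_mem hne)
  refine ⟨pvHexDigitChar ((Nat.digits 16 m).getLast hne),
          (((Nat.digits 16 m).map pvHexDigitChar).reverse).tail, ?_,
          hexchar_ne_0x _ hlt hlast⟩
  have h1 : ((Nat.digits 16 m).map pvHexDigitChar).reverse.head? = some (pvHexDigitChar ((Nat.digits 16 m).getLast hne)) := by
    rw [List.head?_reverse, List.getLast?_map, List.getLast?_eq_some_getLast hne]
    rfl
  simp only [pvHexChars, if_neg hm]
  cases he : ((Nat.digits 16 m).map pvHexDigitChar).reverse with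
  | nil => rw [he] at h1; simp at h1
  | cons a t => rw [he] at h1; simp at h1; simp [h1]

lemma backend_eq (m : Nat) :
    PySem.Chars.zfill (pvRstripL (pvLstrip0x (pvPyHexChars (m : Int)))) 32
      = PySem.Chars.zfill (pvHexChars m) 32 := by
  have hpy : pvPyHexChars (m : Int) = '0' :: 'x' :: pvHexChars m := by
    simp [pvPyHexChars]
  rw [hpy]
  by_cases hm : m = 0
  · subst hm; decide
  · obtain ⟨c, rest, hcr, hc⟩ := pvHexChars_head m hm
    have hstrip : pvLstrip0x ('0' :: 'x' :: pvHexChars m) = pvHexChars m := by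
      rw [hcr]
      simp [pvLstrip0x, hc]
    rw [hstrip]
    have hrs : pvRstripL (pvHexChars m) = pvHexChars m := by
      unfold pvRstripL
      rw [List.dropWhile_eq_self_iff.mpr ?_]
      · simp
      · intro hl
        have hmem : (pvHexChars m).reverse[0] ∈ (pvHexChars m).reverse := List.getElem_mem hl
        rw [List.mem_reverse] at hmem
        have hx := pvHexChars_mem m _ hmem
        simp at hx ⊢
        rcases hx with h|h|h|h|h|h|h|h|h|h|h|h|h|h|h|h <;> simp [h]
    rw [hrs]

set_option maxHeartbeats 4000000 in
lemma chunk_value (cs : List Char) (h : cs.length = 8) :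
    pvBinVal ((kc cs).1) = pvTop2 (pvBinVal cs) := by
  match cs, h with
  | [c0, c1, c2, c3, c4, c5, c6, c7], _ =>
    by_cases h0 : c0 = '1' <;> by_cases h1 : c1 = '1' <;> by_cases h2 : c2 = '1' <;>
      by_cases h3 : c3 = '1' <;> by_cases h4 : c4 = '1' <;> by_cases h5 : c5 = '1' <;>
      by_cases h6 : c6 = '1' <;> by_cases h7 : c7 = '1' <;>
      simp [pvBinVal, kc, kcStep, h0, h1, h2, h3, h4, h5, h6, h7] <;> decide

lemma pvBStep_eq (w : List Char) (a : Int) (k : Nat) (h : 8 * k + 8 ≤ w.length) :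
    pvBStep w a ((k : Nat) : Int) = a * 256 + pvBinVal ((kc (pvChunk w k)).1) := by
  have hsl : PySem.List.slice w (some (8 * (k : Int))) (some (8 * (k : Int) + 8)) = pvChunk w k := by
    rw [show (8 * (k : Int)) = ((8 * k : Nat) : Int) by push_cast; ring,
        show ((8 * k : Nat) : Int) + 8 = ((8 * k + 8 : Nat) : Int) by push_cast; ring,
        PySem.List.slice_natCast]
    simp [pvChunk]
  have hch : (pvChunk w k).length = 8 := by
    simp [pvChunk]; omega
  unfold pvBStep
  rw [hsl, chunk_value _ hch, Int.shiftLeft_eq]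
  norm_num [pvTop2]

lemma flatten_len (w : List Char) : ∀ (ks : List Nat), (∀ k ∈ ks, 8 * k + 8 ≤ w.length) →
    ((ks.map (fun k => (kc (pvChunk w k)).1)).flatten).length = 8 * ks.length := by
  intro ks
  induction ks with
  | nil => intro _; simp
  | cons k ks ih =>
    intro hk
    simp only [List.map_cons, List.flatten_cons, List.length_append, List.length_cons]
    rw [ih (fun x hx => hk x (by simp [hx])), kc_len]
    have : (pvChunk w k).length = 8 := by
      have := hk k (by simp)
      simp [pvChunk]; omega
    rw [this]; ring

lemma B_horner (w : List Char) : ∀ (ks : List Nat), (∀ k ∈ ks, 8 * k + 8 ≤ w.length) →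
    ∀ (a : Int),
    (ks.map (Nat.cast : Nat → Int)).foldl (pvBStep w) a
      = a * 256 ^ ks.length + pvBinVal ((ks.map (fun k => (kc (pvChunk w k)).1)).flatten) := by
  intro ks
  induction ks with
  | nil => intro _ a; simp [pvBinVal]
  | cons k ks ih =>
    intro hk a
    simp only [List.map_cons, List.foldl_cons, List.flatten_cons, List.length_cons]
    rw [pvBStep_eq w a k (hk k (by simp)), ih (fun x hx => hk x (by simp [hx])),
        binval_append, flatten_len w ks (fun x hx => hk x (by simp [hx]))]
    have h256 : ((256 : Int)) ^ ks.length = 2 ^ (8 * ks.length) := by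
      rw [pow_mul]; norm_num
    rw [pow_succ, h256]
    ring

lemma core_eq (w : List Char) (hw : 128 ≤ w.length) :
    (PySem.List.pyRange 0 16 1).foldl (pvBStep w) 0
      = pvBinVal (((PySem.List.pyRange 0 128 1).foldl (pvAStep w) ([], 0)).1) := by
  have h16 : PySem.List.pyRange 0 16 1 = (List.range 16).map (Nat.cast : Nat → Int) := by
    rw [show (16 : Int) = ((16 : Nat) : Int) by norm_num, PySem.List.pyRange_zero_natCast]
  have h128 : PySem.List.pyRange 0 128 1 = (List.range' (8 * 0) (8 * 16)).map (Nat.cast : Nat → Int) := by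
    rw [show (128 : Int) = ((128 : Nat) : Int) by norm_num, PySem.List.pyRange_zero_natCast]
    norm_num [List.range_eq_range']
  rw [h16, h128, List.range_eq_range']
  rw [A_fold w 16 0 (by omega) [] 0]
  rw [B_horner w (List.range' 0 16) (by intro k hk; simp [List.mem_range'_1] at hk; omega) 0]
  simp

lemma binIn_len (n : Int) : 128 ≤ (pvBinIn n).length := by
  simp [pvBinIn, PySem.Chars.length_zfill]

-- ===== VERDICT (by name: the statement is the Claim_ definition above) =====
theorem filter_8bit_1bitx2_spec : Claim_equal_filter_8bit_1bitx2 := by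
  intro hex_in _ hpre
  unfold Spec_filter_8bit_1bitx2
  cases h : PySem.Int.ofStrBase? hex_in 16 with
  | none =>
    exfalso
    unfold Pre_filter_8bit_1bitx2 at hpre
    rw [h] at hpre
    norm_num at hpre
  | some n =>
    simp only [filter_8bit_1bitx2, filter_8bit_1bitx2_alt, h]
    rw [core_eq (pvBinIn n) (binIn_len n)]
    have hr : 0 ≤ pvBinVal (((PySem.List.pyRange 0 128 1).foldl (pvAStep (pvBinIn n)) ([], 0)).1) :=
      binval_nonneg _
    rw [← Int.toNat_of_nonneg hr, backend_eq, Int.toNat_natCast]
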